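-- pv_equiv track=rewrite | github.com/abdullahjahangir36/100-Python-Practice-Problem | task81.py | swap_max_min
-- ===== SOURCE A (Python) =====
-- def swap_max_min(dict):
--     # Check if the dictionary is empty
--     if not dict:
--         return dict
--
--     # Find the maximum and minimum values
--     max_value = max(dict.values())
--     min_value = min(dict.values())
--
--     # Find the corresponding keys for these values
--     max_key = [key for key, value in dict.items() if value == max_value][0]
--     min_key = [key for key, value in dict.items() if value == min_value][0]
--
--     # Swap the key-value pairs for the maximum and minimum values
--     dict[max_key], dict[min_key] = min_value, max_value
--
--     return dict
-- ===== SOURCE B (Python) =====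
-- def swap_max_min(dict):
--     # Single pass over items: track first-occurring max and min entries.
--     if not dict:
--         return dict
--     it = iter(dict.items())
--     first_key, first_value = next(it)
--     max_key = min_key = first_key
--     max_value = min_value = first_value
--     for k, v in it:
--         if v > max_value:
--             max_key, max_value = k, v
--         if v < min_value:
--             min_key, min_value = k, v
--     dict[max_key], dict[min_key] = min_value, max_value
--     return dict
-- ===== Notes on version B (the rewrite author's own statement) =====
-- stated objective: alternative
-- what changed: Replaces A's four separate scans (max of values, min of values, and two list-comprehension scans for the first key of each extreme) by one single pass over dict.items() tracking both extreme entries, then performs the same in-place swap.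
import Mathlib
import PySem

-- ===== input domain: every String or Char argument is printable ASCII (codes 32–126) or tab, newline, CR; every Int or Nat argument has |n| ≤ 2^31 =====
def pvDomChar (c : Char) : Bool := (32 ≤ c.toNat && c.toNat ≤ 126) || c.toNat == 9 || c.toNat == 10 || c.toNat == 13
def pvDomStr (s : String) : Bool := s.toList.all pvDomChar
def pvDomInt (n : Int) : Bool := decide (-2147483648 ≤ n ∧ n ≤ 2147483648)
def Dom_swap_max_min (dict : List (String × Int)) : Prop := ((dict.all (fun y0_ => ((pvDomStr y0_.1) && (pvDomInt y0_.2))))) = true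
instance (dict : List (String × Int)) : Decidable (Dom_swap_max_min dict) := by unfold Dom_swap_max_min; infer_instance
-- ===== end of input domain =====

-- B replaces A's four scans over the dict (max of values, min of values, two key
-- comprehensions) by one single pass tracking both extreme entries; same
-- first-occurrence tie-breaking, same in-place swap, same return value.
-- (A mutates its argument in place; the equivalence proved here is about the return value.)

-- ===== PORT A =====
def swap_max_min (dict : List (String × Int)) : List (String × Int) :=
  let d := PySem.Dict.mk dict
  if d.items = [] then d.items
  else
    match PySem.List.max? d.values (fun v => v), PySem.List.min? d.values (fun v => v) with
    | some max_value, some min_value =>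
      match PySem.List.pyGet? ((d.items.filter (fun p => p.2 == max_value)).map Prod.fst) 0,
            PySem.List.pyGet? ((d.items.filter (fun p => p.2 == min_value)).map Prod.fst) 0 with
      | some max_key, some min_key =>
          ((d.insert max_key min_value).insert min_key max_value).items
      | _, _ => d.items   -- unreachable (the comprehension is nonempty when the dict is)
    | _, _ => d.items     -- unreachable (values nonempty when the dict is)

-- ===== PORT B =====
-- loop body of B: update the (max entry, min entry) state with one item
def pvStep (st : (String × Int) × (String × Int)) (p : String × Int) :
    (String × Int) × (String × Int) :=
  (if p.2 > st.1.2 then p else st.1, if p.2 < st.2.2 then p else st.2)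

def swap_max_min_alt (dict : List (String × Int)) : List (String × Int) :=
  let d := PySem.Dict.mk dict
  match d.items with
  | [] => d.items
  | first :: rest =>
    let st := rest.foldl pvStep (first, first)
    ((d.insert st.1.1 st.2.2).insert st.2.1 st.1.2).items

-- ===== PRECONDITION & SPEC =====
def Spec_swap_max_min (dict : List (String × Int)) (out : List (String × Int)) : Prop := out = swap_max_min_alt dict
instance (dict : List (String × Int)) (out : List (String × Int)) : Decidable (Spec_swap_max_min dict out) := by unfold Spec_swap_max_min; infer_instance

-- ===== CLAIM (what is proved, stated in full; the proofs are below) =====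
def Claim_equal_swap_max_min : Prop := ∀ (dict : List (String × Int)), Dom_swap_max_min dict → Spec_swap_max_min dict (swap_max_min dict)

-- ===== LEMMAS AND PROOFS =====

-- named loop bodies (proof-only abbreviations for the two halves of pvStep)
def pvMaxStep (s p : String × Int) : String × Int := if p.2 > s.2 then p else s
def pvMinStep (s p : String × Int) : String × Int := if p.2 < s.2 then p else s

theorem pvStep_eq (st : (String × Int) × (String × Int)) (p : String × Int) :
    pvStep st p = (pvMaxStep st.1 p, pvMinStep st.2 p) := rfl

-- The combined fold splits into independent max- and min-folds.
theorem foldl_pvStep_split (l : List (String × Int)) (a b : String × Int) :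
    l.foldl pvStep (a, b) = (l.foldl pvMaxStep a, l.foldl pvMinStep b) := by
  induction l generalizing a b with
  | nil => rfl
  | cons p t ih => simp [List.foldl_cons, pvStep_eq, ih]

theorem le_foldl_maxSnd (t : List (String × Int)) (a : Int) :
    a ≤ t.foldl (fun m p => max m p.2) a := by
  induction t generalizing a with
  | nil => simp
  | cons p t ih => exact le_trans (le_max_left _ _) (ih (max a p.2))

theorem foldl_minSnd_le (t : List (String × Int)) (a : Int) :
    t.foldl (fun m p => min m p.2) a ≤ a := by
  induction t generalizing a with
  | nil => simp
  | cons p t ih => exact le_trans (ih (min a p.2)) (min_le_left _ _)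

-- Characterisation of the running-max fold: its value is the running max of the
-- values, and the final state is the first pair of the list carrying that value.
theorem foldl_maxStep_char (l : List (String × Int)) (x : String × Int) :
    (l.foldl pvMaxStep x).2 = l.foldl (fun m p => max m p.2) x.2
    ∧ ((x :: l).filter (fun p => p.2 == (l.foldl pvMaxStep x).2)).head?
        = some (l.foldl pvMaxStep x) := by
  induction l generalizing x with
  | nil => simp
  | cons p t ih =>
    obtain ⟨ihv, ihf⟩ := ih (pvMaxStep x p)
    have hst : (pvMaxStep x p).2 = max x.2 p.2 := by
      simp only [pvMaxStep]; split <;> omega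
    have hval : (t.foldl pvMaxStep (pvMaxStep x p)).2
        = (p :: t).foldl (fun m q => max m q.2) x.2 := by
      rw [ihv, List.foldl_cons, hst]
    have hge : (pvMaxStep x p).2 ≤ (t.foldl pvMaxStep (pvMaxStep x p)).2 := by
      rw [ihv]; exact le_foldl_maxSnd t _
    refine ⟨by rw [List.foldl_cons]; exact hval, ?_⟩
    rw [List.foldl_cons]
    by_cases hp : p.2 > x.2
    · have hmx : pvMaxStep x p = p := by simp [pvMaxStep, hp]
      rw [hmx] at ihf hge ⊢
      have hx : ¬ x.2 = (t.foldl pvMaxStep p).2 := by omega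
      simpa [hx] using ihf
    · have hmx : pvMaxStep x p = x := by simp [pvMaxStep, hp]
      rw [hmx] at ihf hge ⊢
      by_cases hx : x.2 = (t.foldl pvMaxStep x).2
      · have hhd : ((x :: t).filter (fun q => q.2 == (t.foldl pvMaxStep x).2)).head? = some x := by
          simp [hx]
        rw [hhd] at ihf
        simp [List.filter_cons, hx, ← ihf]
      · have hpne : ¬ p.2 = (t.foldl pvMaxStep x).2 := by omega
        rw [List.filter_cons_of_neg (by simpa using hx)] at ihf
        rw [List.filter_cons_of_neg (by simpa using hx),
            List.filter_cons_of_neg (by simpa using hpne)]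
        exact ihf

-- Dual characterisation for the running-min fold.
theorem foldl_minStep_char (l : List (String × Int)) (x : String × Int) :
    (l.foldl pvMinStep x).2 = l.foldl (fun m p => min m p.2) x.2
    ∧ ((x :: l).filter (fun p => p.2 == (l.foldl pvMinStep x).2)).head?
        = some (l.foldl pvMinStep x) := by
  induction l generalizing x with
  | nil => simp
  | cons p t ih =>
    obtain ⟨ihv, ihf⟩ := ih (pvMinStep x p)
    have hst : (pvMinStep x p).2 = min x.2 p.2 := by
      simp only [pvMinStep]; split <;> omega
    have hval : (t.foldl pvMinStep (pvMinStep x p)).2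
        = (p :: t).foldl (fun m q => min m q.2) x.2 := by
      rw [ihv, List.foldl_cons, hst]
    have hge : (t.foldl pvMinStep (pvMinStep x p)).2 ≤ (pvMinStep x p).2 := by
      rw [ihv]; exact foldl_minSnd_le t _
    refine ⟨by rw [List.foldl_cons]; exact hval, ?_⟩
    rw [List.foldl_cons]
    by_cases hp : p.2 < x.2
    · have hmx : pvMinStep x p = p := by simp [pvMinStep, hp]
      rw [hmx] at ihf hge ⊢
      have hx : ¬ x.2 = (t.foldl pvMinStep p).2 := by omega
      simpa [hx] using ihf
    · have hmx : pvMinStep x p = x := by simp [pvMinStep, hp]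
      rw [hmx] at ihf hge ⊢
      by_cases hx : x.2 = (t.foldl pvMinStep x).2
      · have hhd : ((x :: t).filter (fun q => q.2 == (t.foldl pvMinStep x).2)).head? = some x := by
          simp [hx]
        rw [hhd] at ihf
        simp [List.filter_cons, hx, ← ihf]
      · have hpne : ¬ p.2 = (t.foldl pvMinStep x).2 := by omega
        rw [List.filter_cons_of_neg (by simpa using hx)] at ihf
        rw [List.filter_cons_of_neg (by simpa using hx),
            List.filter_cons_of_neg (by simpa using hpne)]
        exact ihf

-- ===== VERDICT (by name: the statement is the Claim_ definition above) =====
theorem swap_max_min_spec : Claim_equal_swap_max_min := by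
  intro dict _
  unfold Spec_swap_max_min swap_max_min swap_max_min_alt
  cases hd : dict with
  | nil => rfl
  | cons x rest =>
    obtain ⟨hmv, hmf⟩ := foldl_maxStep_char rest x
    obtain ⟨hnv, hnf⟩ := foldl_minStep_char rest x
    have hitems : (PySem.Dict.mk (x :: rest)).items = x :: rest := rfl
    have hvalues : (PySem.Dict.mk (x :: rest)).values = x.2 :: rest.map Prod.snd := by
      simp [PySem.Dict.values]
    have hmax : PySem.List.max? ((PySem.Dict.mk (x :: rest)).values) (fun v => v)
        = some ((rest.foldl pvMaxStep x)).2 := by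
      rw [hvalues, PySem.List.max?_id_cons, List.foldl_map, ← hmv]
    have hmin : PySem.List.min? ((PySem.Dict.mk (x :: rest)).values) (fun v => v)
        = some ((rest.foldl pvMinStep x)).2 := by
      rw [hvalues, PySem.List.min?_id_cons, List.foldl_map, ← hnv]
    obtain ⟨tf, htf⟩ : ∃ tf, ((x :: rest).filter (fun p => p.2 == (rest.foldl pvMaxStep x).2))
        = (rest.foldl pvMaxStep x) :: tf := by
      cases h : ((x :: rest).filter (fun p => p.2 == (rest.foldl pvMaxStep x).2)) with
      | nil => rw [h] at hmf; simp at hmf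
      | cons a b => rw [h] at hmf; simp at hmf; exact ⟨b, by rw [hmf]⟩
    obtain ⟨tg, htg⟩ : ∃ tg, ((x :: rest).filter (fun p => p.2 == (rest.foldl pvMinStep x).2))
        = (rest.foldl pvMinStep x) :: tg := by
      cases h : ((x :: rest).filter (fun p => p.2 == (rest.foldl pvMinStep x).2)) with
      | nil => rw [h] at hnf; simp at hnf
      | cons a b => rw [h] at hnf; simp at hnf; exact ⟨b, by rw [hnf]⟩
    have hgetmax : PySem.List.pyGet?
        (((PySem.Dict.mk (x :: rest)).items.filter (fun p => p.2 == (rest.foldl pvMaxStep x).2)).map Prod.fst) 0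
        = some (rest.foldl pvMaxStep x).1 := by
      rw [hitems, htf]; simp [PySem.List.pyGet?, PySem.List.pyIdx?]
    have hgetmin : PySem.List.pyGet?
        (((PySem.Dict.mk (x :: rest)).items.filter (fun p => p.2 == (rest.foldl pvMinStep x).2)).map Prod.fst) 0
        = some (rest.foldl pvMinStep x).1 := by
      rw [hitems, htg]; simp [PySem.List.pyGet?, PySem.List.pyIdx?]
    have hne : ¬ ((PySem.Dict.mk (x :: rest)).items = []) := by rw [hitems]; simp
    rw [if_neg hne, hmax, hmin]
    dsimp only
    rw [hgetmax, hgetmin]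
    dsimp only
    rw [foldl_pvStep_split]
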